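-- pv_equiv track=rewrite | github.com/DieterJoubert/advent_of_code | 2023/day_02.py | get_min_bags
-- ===== SOURCE A (Python) =====
-- def get_min_bags(data):
-- 	min_bags = []
--
-- 	for game in data:
-- 		this_min_bag = {}
--
-- 		for reveal in game:
-- 			for color, num in reveal.items():
--
-- 				if color not in this_min_bag:
-- 					this_min_bag[color] = num
-- 				else:
-- 					this_min_bag[color] = max(this_min_bag[color], num)
--
-- 		min_bags.append(this_min_bag)
--
-- 	return min_bags
-- ===== SOURCE B (Python) =====
-- def get_min_bags(data):
--     # Flatten-then-scan: per game, flatten all reveals into one flat list of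
--     # (color, num) pairs, list the distinct colors in first-occurrence order,
--     # and compute each color's answer by a direct max-scan of the flat list.
--     # No accumulator dict and no per-pair update step at all.
--     result = []
--     for game in data:
--         pairs = [(c, n) for reveal in game for c, n in reveal.items()]
--         colors = dict.fromkeys(c for c, _ in pairs)
--         result.append({c: max(n for cc, n in pairs if cc == c) for c in colors})
--     return result
-- ===== Notes on version B (the rewrite author's own statement) =====
-- stated objective: alternative
-- what changed: B keeps no per-game dict accumulator: it flattens every game into one flat list of (color, num) pairs, collects the distinct colors in first-occurrence order with dict.fromkeys, and computes each color's value by an independent brute-force max-scan over the flat list (k scans of the pair list instead of A's single pass updating a running-max dict).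
import Mathlib
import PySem

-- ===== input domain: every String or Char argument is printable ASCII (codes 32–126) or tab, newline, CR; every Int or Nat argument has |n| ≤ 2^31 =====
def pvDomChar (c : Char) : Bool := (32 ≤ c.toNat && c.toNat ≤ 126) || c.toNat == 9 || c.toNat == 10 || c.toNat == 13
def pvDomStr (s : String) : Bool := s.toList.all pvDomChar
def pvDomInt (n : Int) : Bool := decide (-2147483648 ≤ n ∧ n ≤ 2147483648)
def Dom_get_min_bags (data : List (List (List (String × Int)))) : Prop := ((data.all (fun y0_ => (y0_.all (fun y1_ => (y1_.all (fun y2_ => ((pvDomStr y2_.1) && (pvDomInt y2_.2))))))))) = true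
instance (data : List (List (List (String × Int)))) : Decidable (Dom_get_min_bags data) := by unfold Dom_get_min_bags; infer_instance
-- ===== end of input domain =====

-- B drops A's per-game accumulator dict: it flattens each game to one flat pair list, dedups the
-- colors, and finds each color's value by an independent max-scan of the flat list; same results,
-- different algorithm (k scans instead of one running-max pass). Return value only; no mutation.
-- Each reveal (a Python dict) is decoded from its association list with PySem.Dict.ofList in both ports.

-- ===== PORT A =====
def get_min_bags (data : List (List (List (String × Int)))) : List (List (String × Int)) :=
  data.foldl (fun min_bags game =>
    min_bags ++ [(game.foldl (fun this_min_bag reveal =>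
      (PySem.Dict.ofList reveal).items.foldl (fun this_min_bag p =>
        if this_min_bag.contains p.1 = false then
          this_min_bag.insert p.1 p.2
        else
          this_min_bag.insert p.1 (max (this_min_bag.getD p.1 0) p.2)) this_min_bag)
      PySem.Dict.empty).items]) []

-- ===== PORT B =====
-- Python max() over a nonempty list (the [] case never occurs in this program: every color
-- scanned comes from the pair list itself)
def pyMax (l : List Int) : Int :=
  match l with
  | [] => 0
  | h :: t => t.foldl max h

def get_min_bags_alt (data : List (List (List (String × Int)))) : List (List (String × Int)) :=
  data.foldl (fun result game =>
    let pairs := (game.map (fun reveal => (PySem.Dict.ofList reveal).items)).flatten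
    let colors := PySem.List.dedup (pairs.map (fun p => p.1))
    result ++ [colors.map (fun c => (c, pyMax ((pairs.filter (fun p => p.1 == c)).map (fun p => p.2))))]) []

-- ===== PRECONDITION & SPEC =====
def Spec_get_min_bags (data : List (List (List (String × Int)))) (out : List (List (String × Int))) : Prop := out = get_min_bags_alt data
instance (data : List (List (List (String × Int)))) (out : List (List (String × Int))) : Decidable (Spec_get_min_bags data out) := by unfold Spec_get_min_bags; infer_instance

-- ===== CLAIM (what is proved, stated in full; the proofs are below) =====
def Claim_equal_get_min_bags : Prop := ∀ (data : List (List (List (String × Int)))), Dom_get_min_bags data → Spec_get_min_bags data (get_min_bags data)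

-- ===== LEMMAS AND PROOFS =====

-- A's per-pair step, named for the proofs
def stepA (bag : PySem.Dict String Int) (p : String × Int) : PySem.Dict String Int :=
  if bag.contains p.1 = false then bag.insert p.1 p.2
  else bag.insert p.1 (max (bag.getD p.1 0) p.2)

-- running-max as an Option fold
def accMax (o : Option Int) (v : Int) : Option Int :=
  some (match o with | none => v | some m => max m v)

theorem stepA_eq_insert (bag : PySem.Dict String Int) (p : String × Int) :
    stepA bag p = bag.insert p.1 (if bag.contains p.1 = false then p.2 else max (bag.getD p.1 0) p.2) := by
  unfold stepA; split_ifs <;> rfl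

theorem foldl_nested (f : PySem.Dict String Int → String × Int → PySem.Dict String Int)
    (game : List (List (String × Int))) (b : PySem.Dict String Int) :
    game.foldl (fun b r => ((PySem.Dict.ofList r).items).foldl f b) b
      = ((game.map (fun r => (PySem.Dict.ofList r).items)).flatten).foldl f b := by
  induction game generalizing b with
  | nil => rfl
  | cons r rest ih => simp [List.foldl_append, ih]

theorem get?_foldl_stepA (l : List (String × Int)) (bag : PySem.Dict String Int) (k : String) :
    (l.foldl stepA bag).get? k
      = ((l.filter (fun p => p.1 == k)).map (fun p => p.2)).foldl accMax (bag.get? k) := by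
  induction l generalizing bag with
  | nil => rfl
  | cons p rest ih =>
    simp only [List.foldl_cons, ih]
    by_cases h : p.1 = k
    · have hf : (p :: rest).filter (fun q => q.1 == k) = p :: rest.filter (fun q => q.1 == k) := by
        simp [h]
      rw [hf]
      simp only [List.map_cons, List.foldl_cons]
      congr 1
      rw [stepA_eq_insert, PySem.Dict.get?_insert, if_pos h.symm,
        PySem.Dict.contains_eq_isSome_get?, PySem.Dict.getD_eq_get?_getD, h]
      cases bag.get? k <;> simp [accMax]
    · have hf : (p :: rest).filter (fun q => q.1 == k) = rest.filter (fun q => q.1 == k) := by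
        simp [h]
      rw [hf]
      congr 1
      rw [stepA_eq_insert, PySem.Dict.get?_insert, if_neg (fun hk => h hk.symm)]

theorem foldl_accMax_some (t : List Int) (h : Int) :
    t.foldl accMax (some h) = some (t.foldl max h) := by
  induction t generalizing h with
  | nil => rfl
  | cons v rest ih => simp [accMax, ih]

theorem foldl_accMax_none (vs : List Int) (hne : vs ≠ []) :
    vs.foldl accMax none = some (pyMax vs) := by
  cases vs with
  | nil => exact absurd rfl hne
  | cons v t => simp [accMax, pyMax, foldl_accMax_some]

-- the heart: on one flattened list of (color, num) pairs A's dict loop yields exactly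
-- B's dedup-then-scan value
theorem core (l : List (String × Int)) :
    (l.foldl stepA PySem.Dict.empty).items
      = (PySem.List.dedup (l.map (fun p => p.1))).map
          (fun c => (c, pyMax ((l.filter (fun p => p.1 == c)).map (fun p => p.2)))) := by
  have hAform : l.foldl stepA PySem.Dict.empty
      = l.foldl (fun bag p => bag.insert p.1
          (if bag.contains p.1 = false then p.2 else max (bag.getD p.1 0) p.2)) PySem.Dict.empty := by
    have : ∀ (l' : List (String × Int)) (bag : PySem.Dict String Int),
        l'.foldl stepA bag = l'.foldl (fun bag p => bag.insert p.1
          (if bag.contains p.1 = false then p.2 else max (bag.getD p.1 0) p.2)) bag := by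
      intro l'
      induction l' with
      | nil => intro bag; rfl
      | cons p rest ih => intro bag; simp only [List.foldl_cons, stepA_eq_insert, ih]
    exact this l _
  have hAkeys : (l.foldl stepA PySem.Dict.empty).keys = PySem.Set.ofList (l.map (fun p => p.1)) := by
    rw [hAform, PySem.Dict.keys_foldl_insert_key l (fun p => p.1)
      (fun bag p => if bag.contains p.1 = false then p.2 else max (bag.getD p.1 0) p.2)]
    simp [PySem.Set.update_nil_left]
  have hAnd : (l.foldl stepA PySem.Dict.empty).keys.Nodup := by
    rw [hAform]
    exact PySem.Dict.nodup_keys_foldl_insert_key l (fun p => p.1) _ _ (by simp)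
  rw [PySem.Dict.items_eq_map_keys _ hAnd 0, hAkeys, PySem.List.dedup_eq_ofList]
  apply List.map_congr_left
  intro k hk
  have hkmem : k ∈ l.map (fun p => p.1) := (PySem.Set.mem_ofList _ k).mp hk
  have hne : (l.filter (fun p => p.1 == k)).map (fun p => p.2) ≠ [] := by
    rcases List.mem_map.mp hkmem with ⟨p, hp, hpk⟩
    have : p ∈ l.filter (fun q => q.1 == k) := by
      simp [List.mem_filter, hp, hpk]
    intro hcontra
    rcases List.eq_nil_of_map_eq_nil hcontra with hfil
    simp [hfil] at this
  have hA : (l.foldl stepA PySem.Dict.empty).getD k 0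
      = pyMax ((l.filter (fun p => p.1 == k)).map (fun p => p.2)) := by
    rw [PySem.Dict.getD_eq_get?_getD, get?_foldl_stepA, PySem.Dict.get?_empty,
      foldl_accMax_none _ hne]
    rfl
  simp [hA]

-- appending singletons in a fold builds the map
theorem foldl_append_map (data : List (List (List (String × Int))))
    (f : List (List (String × Int)) → List (String × Int))
    (init : List (List (String × Int))) :
    data.foldl (fun acc g => acc ++ [f g]) init = init ++ data.map f := by
  induction data generalizing init with
  | nil => simp
  | cons g rest ih => simp [ih]

-- ===== VERDICT (by name: the statement is the Claim_ definition above) =====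
theorem get_min_bags_spec : Claim_equal_get_min_bags := by
  intro data _
  unfold Spec_get_min_bags get_min_bags get_min_bags_alt
  rw [foldl_append_map data
    (fun game => (game.foldl (fun bag reveal =>
      (PySem.Dict.ofList reveal).items.foldl (fun bag p =>
        if bag.contains p.1 = false then bag.insert p.1 p.2
        else bag.insert p.1 (max (bag.getD p.1 0) p.2)) bag) PySem.Dict.empty).items) []]
  rw [foldl_append_map data
    (fun game =>
      (PySem.List.dedup (((game.map (fun reveal => (PySem.Dict.ofList reveal).items)).flatten).map (fun p => p.1))).map
        (fun c => (c, pyMax (((((game.map (fun reveal => (PySem.Dict.ofList reveal).items)).flatten).filter (fun p => p.1 == c)).map (fun p => p.2)))))) []]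
  simp only [List.nil_append]
  apply List.map_congr_left
  intro game _
  rw [show (fun (bag : PySem.Dict String Int) (p : String × Int) =>
      if bag.contains p.1 = false then bag.insert p.1 p.2
      else bag.insert p.1 (max (bag.getD p.1 0) p.2)) = stepA from rfl]
  rw [foldl_nested stepA game]
  exact core _
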